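-- pv_equiv track=rewrite | github.com/riya-ranjan/camel | src/camera/code/decode_image.py | unpack_raw12
-- ===== SOURCE A (Python) =====
-- def unpack_raw12(raw_lines, width, height, packing='mipi'):
--     """
--     Unpack packed RAW12 data to 12-bit pixel values.
--
--     MIPI CSI-2 / V4L2 packed RAW12 format:
--       byte0 = P0[11:4]  (upper 8 bits of pixel 0)
--       byte1 = P1[11:4]  (upper 8 bits of pixel 1)
--       byte2 = P1[3:0] << 4 | P0[3:0]  (lower 4 bits of both)
--     """
--     pixels = []
--     for y in range(height):
--         row = []
--         raw = raw_lines[y]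
--         for x in range(0, width, 2):
--             idx = (x // 2) * 3
--             if idx + 2 >= len(raw):
--                 row.extend([0, 0])
--                 continue
--             b0, b1, b2 = raw[idx], raw[idx+1], raw[idx+2]
--             p0 = (b0 << 4) | (b2 & 0x0F)
--             p1 = (b1 << 4) | (b2 >> 4)
--             row.append(p0)
--             row.append(p1)
--         pixels.append(row[:width])
--     return pixels
-- ===== SOURCE B (Python) =====
-- def unpack_raw12(raw_lines, width, height, packing='mipi'):
--     # zip-of-strided-slices decomposition: collect complete byte triples first,
--     # expand each to its two 12-bit pixels, zero-pad, then truncate to width.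
--     npairs = max(0, (width + 1) // 2)
--     pixels = []
--     for y in range(height):
--         raw = raw_lines[y]
--         triples = list(zip(raw[0::3], raw[1::3], raw[2::3]))[:npairs]
--         row = [p for b0, b1, b2 in triples
--                  for p in ((b0 << 4) | (b2 & 0x0F), (b1 << 4) | (b2 >> 4))]
--         row += [0] * (2 * npairs - len(row))
--         pixels.append(row[:width])
--     return pixels
-- ===== Notes on version B (the rewrite author's own statement) =====
-- stated objective: alternative
-- what changed: B replaces A's index-arithmetic inner loop (per-pair idx=(x//2)*3 with a bounds guard) by a grouping decomposition: it collects each row's complete byte triples with the zip(iter,iter,iter) grouper idiom, expands each triple to its two pixels in one comprehension, zero-pads the row once, then truncates to width.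
import Mathlib
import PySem

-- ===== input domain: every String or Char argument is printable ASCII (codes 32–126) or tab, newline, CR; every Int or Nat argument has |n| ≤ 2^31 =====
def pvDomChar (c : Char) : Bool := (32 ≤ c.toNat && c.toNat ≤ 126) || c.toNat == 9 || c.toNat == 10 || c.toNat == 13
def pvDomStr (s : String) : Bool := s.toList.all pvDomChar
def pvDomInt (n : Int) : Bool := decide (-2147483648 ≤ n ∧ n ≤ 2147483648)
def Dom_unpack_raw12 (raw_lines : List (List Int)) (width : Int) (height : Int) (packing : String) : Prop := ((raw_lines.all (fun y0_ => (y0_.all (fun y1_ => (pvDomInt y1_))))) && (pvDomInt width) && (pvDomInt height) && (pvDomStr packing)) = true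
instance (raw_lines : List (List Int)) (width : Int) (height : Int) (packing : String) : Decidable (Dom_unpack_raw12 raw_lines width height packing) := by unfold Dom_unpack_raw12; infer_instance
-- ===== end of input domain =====

-- B re-decomposes the unpacking: it groups each row into byte triples first (the zip(it,it,it)
-- grouper idiom), expands each triple to its two pixels, zero-pads once, then truncates — same
-- values as A's index-arithmetic loop (objective: alternative decomposition, similar cost).

-- ===== PORT A =====
def unpack_raw12 (raw_lines : List (List Int)) (width : Int) (height : Int) (packing : String) : List (List Int) :=
  (PySem.List.pyRange 0 height 1).foldl (fun pixels y =>
    -- raw_lines[y]; the index is in range under Pre_unpack_raw12, so the default is never taken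
    let raw := PySem.List.pyGetD raw_lines y []
    let row := (PySem.List.pyRange 0 width 2).foldl (fun row x =>
      let idx := PySem.Int.floordiv x 2 * 3
      if PySem.List.len raw ≤ idx + 2 then row ++ [0, 0]
      else
        -- raw[idx], raw[idx+1], raw[idx+2]: in range by the guard above, default never taken
        let b0 := PySem.List.pyGetD raw idx 0
        let b1 := PySem.List.pyGetD raw (idx + 1) 0
        let b2 := PySem.List.pyGetD raw (idx + 2) 0
        let p0 := PySem.Int.bor (b0 <<< (4 : Nat)) (PySem.Int.band b2 15)
        let p1 := PySem.Int.bor (b1 <<< (4 : Nat)) (b2 >>> (4 : Nat))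
        (row ++ [p0]) ++ [p1]) []
    pixels ++ [PySem.List.slice row none (some width)]) []

-- ===== PORT B =====
-- list(zip(it, it, it)) over it = iter(raw): the consecutive complete byte triples of raw
-- (exactly ⌊len raw / 3⌋ of them, left to right) — ported by hand, exact.
def pvChunk3 : List Int → List (Int × Int × Int)
  | b0 :: b1 :: b2 :: rest => (b0, b1, b2) :: pvChunk3 rest
  | _ => []

-- the two pixels one triple (b0, b1, b2) expands to (the comprehension's tuple in Source B)
def pvPix (t : Int × Int × Int) : List Int :=
  [PySem.Int.bor (t.1 <<< (4 : Nat)) (PySem.Int.band t.2.2 15),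
   PySem.Int.bor (t.2.1 <<< (4 : Nat)) (t.2.2 >>> (4 : Nat))]

def unpack_raw12_alt (raw_lines : List (List Int)) (width : Int) (height : Int) (packing : String) : List (List Int) :=
  let npairs := max 0 (PySem.Int.floordiv (width + 1) 2)
  (PySem.List.pyRange 0 height 1).foldl (fun pixels y =>
    -- raw_lines[y]; in range under Pre_unpack_raw12
    let raw := PySem.List.pyGetD raw_lines y []
    let triples := PySem.List.slice (pvChunk3 raw) none (some npairs)
    let row := triples.flatMap pvPix
    let row := row ++ PySem.List.pyRepeat [0] (2 * npairs - PySem.List.len row)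
    pixels ++ [PySem.List.slice row none (some width)]) []

-- ===== PRECONDITION & SPEC =====
-- Pre_ excludes exactly the inputs where A raises IndexError: raw_lines[y] needs y < len(raw_lines)
-- for every y in range(height).
def Pre_unpack_raw12 (raw_lines : List (List Int)) (width : Int) (height : Int) (packing : String) : Prop :=
  height ≤ (raw_lines.length : Int)
instance (raw_lines : List (List Int)) (width : Int) (height : Int) (packing : String) : Decidable (Pre_unpack_raw12 raw_lines width height packing) := by unfold Pre_unpack_raw12; infer_instance

def pvWitness_unpack_raw12 : List (List Int) × Int × Int × String :=
  ([[18, 52, 86], [1, 2, 3]], 2, 2, "mipi")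

def Spec_unpack_raw12 (raw_lines : List (List Int)) (width : Int) (height : Int) (packing : String) (out : List (List Int)) : Prop := out = unpack_raw12_alt raw_lines width height packing
instance (raw_lines : List (List Int)) (width : Int) (height : Int) (packing : String) (out : List (List Int)) : Decidable (Spec_unpack_raw12 raw_lines width height packing out) := by unfold Spec_unpack_raw12; infer_instance

-- ===== CLAIM (what is proved, stated in full; the proofs are below) =====
def Claim_equal_unpack_raw12 : Prop := ∀ (raw_lines : List (List Int)) (width : Int) (height : Int) (packing : String), Dom_unpack_raw12 raw_lines width height packing → Pre_unpack_raw12 raw_lines width height packing → Spec_unpack_raw12 raw_lines width height packing (unpack_raw12 raw_lines width height packing)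

-- ===== LEMMAS AND PROOFS =====

-- what A's inner loop appends at pair index k
def pvG (raw : List Int) (k : Nat) : List Int :=
  if raw.length ≤ 3 * k + 2 then [0, 0]
  else pvPix (raw.getD (3 * k) 0, raw.getD (3 * k + 1) 0, raw.getD (3 * k + 2) 0)

lemma pvFlat_zeros (K : Nat) :
    (List.range K).flatMap (fun _ => ([0, 0] : List Int)) = List.replicate (2 * K) 0 := by
  induction K with
  | zero => rfl
  | succ K ih =>
      rw [List.range_succ, List.flatMap_append, ih]
      simp [List.replicate_add, Nat.mul_succ]

lemma pvG_short (raw : List Int) (hs : raw.length ≤ 2) (k : Nat) : pvG raw k = [0, 0] := by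
  simp only [pvG]; rw [if_pos (by omega)]

lemma pvG_succ (b0 b1 b2 : Int) (r : List Int) (k : Nat) :
    pvG (b0 :: b1 :: b2 :: r) (k + 1) = pvG r k := by
  simp only [pvG, List.length_cons]
  have h3 : 3 * (k + 1) = 3 * k + 3 := by ring
  rw [h3]
  simp only [List.getD_cons_succ, Nat.add_assoc]
  have hc : (r.length + 1 + 1 + 1 ≤ 3 * k + (3 + 2)) ↔ (r.length ≤ 3 * k + 2) := by omega
  rw [if_congr hc rfl rfl]

lemma pvG_zero (b0 b1 b2 : Int) (r : List Int) : pvG (b0 :: b1 :: b2 :: r) 0 = pvPix (b0, b1, b2) := by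
  simp [pvG]

-- the core row fact: A's per-pair appends = B's triples-then-pad row
lemma pvRow_main (raw : List Int) (K : Nat) :
    (List.range K).flatMap (pvG raw) =
      ((pvChunk3 raw).take K).flatMap pvPix ++
        List.replicate (2 * K - 2 * min K (pvChunk3 raw).length) 0 := by
  induction raw using pvChunk3.induct generalizing K with
  | case2 raw h =>
      have hs : raw.length ≤ 2 := by
        rcases raw with _ | ⟨a, _ | ⟨b, _ | ⟨c, r⟩⟩⟩ <;> simp at h ⊢ <;> try exact (h a b c r rfl rfl rfl rfl).elim
      have hc : pvChunk3 raw = [] := by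
        rcases raw with _ | ⟨a, _ | ⟨b, _ | ⟨c, r⟩⟩⟩ <;> simp [pvChunk3] at hs ⊢
      rw [show pvG raw = (fun _ => ([0, 0] : List Int)) from funext (pvG_short raw hs),
        pvFlat_zeros, hc]
      simp
  | case1 b0 b1 b2 r ih =>
      cases K with
      | zero => simp
      | succ K =>
          rw [List.range_succ_eq_map, List.flatMap_cons, List.flatMap_map, pvG_zero,
            show (fun a => pvG (b0 :: b1 :: b2 :: r) a.succ) = pvG r from funext (pvG_succ b0 b1 b2 r),
            ih]
          have hch : pvChunk3 (b0 :: b1 :: b2 :: r) = (b0, b1, b2) :: pvChunk3 r := rfl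
          rw [hch, List.take_succ_cons, List.flatMap_cons, List.length_cons]
          have hrep : 2 * (K + 1) - 2 * min (K + 1) ((pvChunk3 r).length + 1) =
              2 * K - 2 * min K (pvChunk3 r).length := by omega
          rw [hrep, List.append_assoc]

-- the count of A's inner loop equals B's npairs
lemma pvCount_eq (width : Int) :
    (if 0 < width then ((width - 0 + 2 - 1) / 2).toNat else 0) =
      (max 0 (PySem.Int.floordiv (width + 1) 2)).toNat := by
  rw [PySem.Int.floordiv_eq_ediv_of_pos (by norm_num)]
  split <;> omega

-- A's inner-loop body at x = 2*k is an append of pvG raw k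
lemma pvBody_eq (raw : List Int) (row : List Int) (k : Nat) :
    (fun row x =>
      let idx := PySem.Int.floordiv x 2 * 3
      if PySem.List.len raw ≤ idx + 2 then row ++ [0, 0]
      else
        let b0 := PySem.List.pyGetD raw idx 0
        let b1 := PySem.List.pyGetD raw (idx + 1) 0
        let b2 := PySem.List.pyGetD raw (idx + 2) 0
        let p0 := PySem.Int.bor (b0 <<< (4 : Nat)) (PySem.Int.band b2 15)
        let p1 := PySem.Int.bor (b1 <<< (4 : Nat)) (b2 >>> (4 : Nat))
        (row ++ [p0]) ++ [p1]) row (0 + 2 * (k : Int)) = row ++ pvG raw k := by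
  simp only [PySem.Int.floordiv_eq_ediv_of_pos (show (0:Int) < 2 by norm_num), PySem.List.len_eq]
  have hidx : (0 + 2 * (k : Int)) / 2 * 3 = ((3 * k : Nat) : Int) := by push_cast; omega
  rw [hidx]
  by_cases hc : raw.length ≤ 3 * k + 2
  · rw [if_pos (by exact_mod_cast (by omega : (raw.length : Int) ≤ ((3 * k : Nat) : Int) + 2)),
      pvG, if_pos hc]
  · rw [if_neg (by push_cast; omega), pvG, if_neg hc]
    have h1 : ((3 * k : Nat) : Int) + 1 = ((3 * k + 1 : Nat) : Int) := by push_cast; ring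
    have h2 : ((3 * k : Nat) : Int) + 2 = ((3 * k + 2 : Nat) : Int) := by push_cast; ring
    rw [h1, h2, PySem.List.pyGetD_natCast, PySem.List.pyGetD_natCast, PySem.List.pyGetD_natCast]
    simp [pvPix, List.append_assoc]

-- per-row equality of the two ports' inner computations
lemma pvRow_eq (raw : List Int) (width : Int) :
    (PySem.List.pyRange 0 width 2).foldl (fun row x =>
      let idx := PySem.Int.floordiv x 2 * 3
      if PySem.List.len raw ≤ idx + 2 then row ++ [0, 0]
      else
        let b0 := PySem.List.pyGetD raw idx 0
        let b1 := PySem.List.pyGetD raw (idx + 1) 0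
        let b2 := PySem.List.pyGetD raw (idx + 2) 0
        let p0 := PySem.Int.bor (b0 <<< (4 : Nat)) (PySem.Int.band b2 15)
        let p1 := PySem.Int.bor (b1 <<< (4 : Nat)) (b2 >>> (4 : Nat))
        (row ++ [p0]) ++ [p1]) [] =
    (PySem.List.slice (pvChunk3 raw) none (some (max 0 (PySem.Int.floordiv (width + 1) 2)))).flatMap pvPix ++
      PySem.List.pyRepeat [0]
        (2 * max 0 (PySem.Int.floordiv (width + 1) 2) -
          PySem.List.len ((PySem.List.slice (pvChunk3 raw) none (some (max 0 (PySem.Int.floordiv (width + 1) 2)))).flatMap pvPix)) := by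
  rw [PySem.List.pyRange_of_pos 0 width (by norm_num), List.foldl_map,
    show (fun (row : List Int) (k : Nat) =>
        (fun row x =>
          let idx := PySem.Int.floordiv x 2 * 3
          if PySem.List.len raw ≤ idx + 2 then row ++ [0, 0]
          else
            let b0 := PySem.List.pyGetD raw idx 0
            let b1 := PySem.List.pyGetD raw (idx + 1) 0
            let b2 := PySem.List.pyGetD raw (idx + 2) 0
            let p0 := PySem.Int.bor (b0 <<< (4 : Nat)) (PySem.Int.band b2 15)
            let p1 := PySem.Int.bor (b1 <<< (4 : Nat)) (b2 >>> (4 : Nat))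
            (row ++ [p0]) ++ [p1]) row (0 + 2 * (k : Int))) = (fun row k => row ++ pvG raw k)
      from funext fun row => funext fun k => pvBody_eq raw row k,
    PySem.List.foldl_append_eq_flatMap, List.nil_append, pvCount_eq,
    PySem.List.slice_to (pvChunk3 raw) (le_max_left 0 _), PySem.List.pyRepeat_singleton, PySem.List.len_eq,
    pvRow_main raw (max 0 (PySem.Int.floordiv (width + 1) 2)).toNat]
  congr 1
  rw [List.length_flatMap]
  have hlen : (List.map (fun t => (pvPix t).length) ((pvChunk3 raw).take (max 0 (PySem.Int.floordiv (width + 1) 2)).toNat)).sum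
      = 2 * min (max 0 (PySem.Int.floordiv (width + 1) 2)).toNat (pvChunk3 raw).length := by
    rw [show (fun t => (pvPix t).length) = (fun _ => 2) from funext fun t => rfl]
    simp [List.map_const', List.sum_replicate]
    omega
  rw [hlen]
  congr 1
  have h0 : (0:Int) ≤ max 0 (PySem.Int.floordiv (width + 1) 2) := le_max_left 0 _
  omega

-- ===== VERDICT (by name: the statement is the Claim_ definition above) =====
theorem unpack_raw12_spec : Claim_equal_unpack_raw12 := by
  intro raw_lines width height packing _ _
  unfold Spec_unpack_raw12 unpack_raw12 unpack_raw12_alt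
  have h : ∀ y : Int,
      (PySem.List.slice ((PySem.List.pyRange 0 width 2).foldl (fun row x =>
        let idx := PySem.Int.floordiv x 2 * 3
        if PySem.List.len (PySem.List.pyGetD raw_lines y []) ≤ idx + 2 then row ++ [0, 0]
        else
          let b0 := PySem.List.pyGetD (PySem.List.pyGetD raw_lines y []) idx 0
          let b1 := PySem.List.pyGetD (PySem.List.pyGetD raw_lines y []) (idx + 1) 0
          let b2 := PySem.List.pyGetD (PySem.List.pyGetD raw_lines y []) (idx + 2) 0
          let p0 := PySem.Int.bor (b0 <<< (4 : Nat)) (PySem.Int.band b2 15)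
          let p1 := PySem.Int.bor (b1 <<< (4 : Nat)) (b2 >>> (4 : Nat))
          (row ++ [p0]) ++ [p1]) []) none (some width)) =
      (PySem.List.slice
        ((PySem.List.slice (pvChunk3 (PySem.List.pyGetD raw_lines y [])) none (some (max 0 (PySem.Int.floordiv (width + 1) 2)))).flatMap pvPix ++
          PySem.List.pyRepeat [0]
            (2 * max 0 (PySem.Int.floordiv (width + 1) 2) -
              PySem.List.len ((PySem.List.slice (pvChunk3 (PySem.List.pyGetD raw_lines y [])) none (some (max 0 (PySem.Int.floordiv (width + 1) 2)))).flatMap pvPix)))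
        none (some width)) := by
    intro y; rw [pvRow_eq]
  simp only []
  rw [PySem.List.foldl_append_singleton_eq_map, PySem.List.foldl_append_singleton_eq_map]
  simp only [List.nil_append]
  exact List.map_congr_left (fun y _ => h y)
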